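-- pv_equiv track=rewrite | github.com/jenny1zzang/Algorithm | 프로그래머스/unrated/181928. 이어 붙인 수/이어 붙인 수.py | solution
-- ===== SOURCE A (Python) =====
-- def solution(num_list):
--     even = 0
--     odd = 0
--     for i in num_list:
--         if i % 2 == 1:
--             if even == 0:
--                 even += i
--             else:
--                 even = even*10 + i
--         else:
--             if odd == 0:
--                 odd += i
--             else:
--                 odd = odd*10 + i
--
--     return even + odd
-- ===== SOURCE B (Python) =====
-- def _cat(ds):
--     acc = 0
--     for d in ds:
--         acc = acc * 10 + d
--     return acc
--
--
-- def solution(num_list):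
--     odds = [d for d in num_list if d % 2 == 1]
--     evens = [d for d in num_list if d % 2 == 0]
--     return _cat(odds) + _cat(evens)
-- ===== Notes on version B (the rewrite author's own statement) =====
-- stated objective: idiomatic
-- what changed: Replaces the single interleaved loop with stateful even==0/odd==0 special cases by a partition into parity groups followed by a plain acc*10+d fold (the zero special cases are provably redundant).
import Mathlib
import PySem

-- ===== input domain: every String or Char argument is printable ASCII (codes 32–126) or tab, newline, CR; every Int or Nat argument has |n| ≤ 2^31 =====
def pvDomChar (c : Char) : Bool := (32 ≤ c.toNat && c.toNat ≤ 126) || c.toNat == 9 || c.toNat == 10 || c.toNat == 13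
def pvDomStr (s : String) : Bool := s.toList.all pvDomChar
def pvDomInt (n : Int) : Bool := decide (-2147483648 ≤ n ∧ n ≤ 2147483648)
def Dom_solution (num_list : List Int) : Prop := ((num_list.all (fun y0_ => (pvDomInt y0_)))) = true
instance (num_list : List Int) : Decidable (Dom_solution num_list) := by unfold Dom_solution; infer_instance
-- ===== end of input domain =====

-- B partitions by parity and folds acc*10+d per group; A's even==0/odd==0 special cases are redundant and dropped.

-- ===== PORT A =====
def solution (num_list : List Int) : Int :=
  let s := num_list.foldl
    (fun (p : Int × Int) i =>
      if PySem.Int.mod i 2 == 1 then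
        (if p.1 == 0 then p.1 + i else p.1 * 10 + i, p.2)
      else
        (p.1, if p.2 == 0 then p.2 + i else p.2 * 10 + i))
    (0, 0)
  s.1 + s.2

-- ===== PORT B =====
def catDigits (ds : List Int) : Int := ds.foldl (fun acc d => acc * 10 + d) 0

def solution_alt (num_list : List Int) : Int :=
  catDigits (num_list.filter (fun d => PySem.Int.mod d 2 == 1)) +
  catDigits (num_list.filter (fun d => PySem.Int.mod d 2 == 0))

-- ===== PRECONDITION & SPEC =====
def Spec_solution (num_list : List Int) (out : Int) : Prop := out = solution_alt num_list
instance (num_list : List Int) (out : Int) : Decidable (Spec_solution num_list out) := by unfold Spec_solution; infer_instance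

-- ===== CLAIM (what is proved, stated in full; the proofs are below) =====
def Claim_equal_solution : Prop := ∀ (num_list : List Int), Dom_solution num_list → Spec_solution num_list (solution num_list)

-- ===== LEMMAS AND PROOFS =====

theorem pv_step_eq (e i : Int) : (if e = 0 then e + i else e * 10 + i) = e * 10 + i := by
  by_cases h : e = 0 <;> simp [h]

theorem pv_invariant (xs : List Int) (e o : Int) :
    xs.foldl
      (fun (p : Int × Int) i =>
        if PySem.Int.mod i 2 == 1 then
          (if p.1 == 0 then p.1 + i else p.1 * 10 + i, p.2)
        else
          (p.1, if p.2 == 0 then p.2 + i else p.2 * 10 + i))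
      (e, o)
    = ((xs.filter (fun d => PySem.Int.mod d 2 == 1)).foldl (fun acc d => acc * 10 + d) e,
       (xs.filter (fun d => PySem.Int.mod d 2 == 0)).foldl (fun acc d => acc * 10 + d) o) := by
  induction xs generalizing e o with
  | nil => rfl
  | cons x xs ih =>
    have hm : PySem.Int.mod x 2 = x % 2 := PySem.Int.mod_eq_emod_of_pos (a := x) (b := 2) (by norm_num)
    have hx : x % 2 = 0 ∨ x % 2 = 1 := by omega
    simp [pv_step_eq] at ih
    rcases hx with h | h
    · simp [List.foldl, List.filter, h, pv_step_eq, ih]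
    · simp [List.foldl, List.filter, h, pv_step_eq, ih]

-- ===== VERDICT (by name: the statement is the Claim_ definition above) =====
theorem solution_spec : Claim_equal_solution := by
  intro num_list _
  unfold Spec_solution solution solution_alt catDigits
  simp only [pv_invariant]
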